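-- pv_equiv track=rewrite | github.com/TheComputerCrasher/bolls-api-client | bolls.py | _split_slash_groups
-- ===== SOURCE A (Python) =====
-- def _split_slash_groups(args: list[str]) -> list[list[str]]:
--     groups = []
--     current = []
--     for token in args:
--         if token == "/":
--             if current:
--                 groups.append(current)
--                 current = []
--             continue
--         if "/" not in token or token.startswith("/") or token.startswith("./") or token.startswith("../"):
--             current.append(token)
--             continue
--         parts = token.split("/")
--         for i, part in enumerate(parts):
--             part = part.strip()
--             if part:
--                 current.append(part)
--             if i < len(parts) - 1:
--                 if current:
--                     groups.append(current)
--                     current = []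
--     if current:
--         groups.append(current)
--     return groups
-- ===== SOURCE B (Python) =====
-- def _events_of(token):
--     # Phase 1 helper: flatten one token into an event stream
--     # (None = group separator, a string = group content).
--     if token == "/":
--         return [None]
--     if "/" not in token or token.startswith(("/", "./", "../")):
--         return [token]
--     evs = []
--     parts = token.split("/")
--     last = len(parts) - 1
--     for i, part in enumerate(parts):
--         p = part.strip()
--         evs.extend(([p] if p else []) + ([None] if i < last else []))
--     return evs
--
--
-- def _split_slash_groups(args: list[str]) -> list[list[str]]:
--     # Phase 1: args -> flat event stream.
--     events = [ev for token in args for ev in _events_of(token)]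
--     # Phase 2: fold the event stream into groups.
--     groups = []
--     current = []
--     for ev in events:
--         if ev is None:
--             if current:
--                 groups.append(current)
--                 current = []
--         else:
--             current.append(ev)
--     if current:
--         groups.append(current)
--     return groups
-- ===== Notes on version B (the rewrite author's own statement) =====
-- stated objective: alternative
-- what changed: Replaced A's single interleaved loop (which mixes tokenizing and group bookkeeping, duplicating the flush logic in two places) by a two-phase pipeline: phase 1 flattens the args into an event stream (separator / content), phase 2 folds that stream into groups with a single flush rule.
import Mathlib
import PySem

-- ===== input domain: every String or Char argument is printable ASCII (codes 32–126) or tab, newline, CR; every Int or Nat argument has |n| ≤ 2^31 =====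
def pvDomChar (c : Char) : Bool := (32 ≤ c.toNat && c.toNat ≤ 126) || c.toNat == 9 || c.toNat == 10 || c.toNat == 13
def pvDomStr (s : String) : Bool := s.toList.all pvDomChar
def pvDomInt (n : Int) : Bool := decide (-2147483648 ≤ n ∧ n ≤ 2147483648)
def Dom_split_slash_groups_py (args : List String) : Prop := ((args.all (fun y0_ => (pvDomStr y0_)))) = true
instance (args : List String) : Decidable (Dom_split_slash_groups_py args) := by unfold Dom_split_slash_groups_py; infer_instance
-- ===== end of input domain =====

-- B replaces A's interleaved tokenize-and-group loop by a two-phase pipeline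
-- (flat event stream, then a single grouping fold); objective: alternative
-- decomposition, same cost.

-- ===== PORT A =====
-- inner loop body of A's `for i, part in enumerate(parts)`
def pvAInner (parts : List String) (st : List (List String) × List String)
    (ip : Int × String) : List (List String) × List String :=
  let part := PySem.Str.strip ip.2
  let st2 := if part ≠ "" then (st.1, st.2 ++ [part]) else st
  if ip.1 < (parts.length : Int) - 1 then
    (if st2.2 ≠ [] then (st2.1 ++ [st2.2], []) else st2)
  else st2

-- loop body of A's `for token in args`
def pvAStep (st : List (List String) × List String) (token : String) :
    List (List String) × List String :=
  if token = "/" then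
    (if st.2 ≠ [] then (st.1 ++ [st.2], []) else st)
  else if !PySem.Str.isIn "/" token || PySem.Str.startswith token "/"
      || PySem.Str.startswith token "./" || PySem.Str.startswith token "../" then
    (st.1, st.2 ++ [token])
  else
    let parts := (PySem.Str.split? token "/").getD []  -- sep "/" is non-empty: split? is always `some` here
    (PySem.List.enumerate parts).foldl (pvAInner parts) st

def split_slash_groups_py (args : List String) : List (List String) :=
  let st := args.foldl pvAStep ([], [])
  if st.2 ≠ [] then st.1 ++ [st.2] else st.1

-- ===== PORT B =====
-- Phase 1 helper: one token -> event stream (none = separator, some = content)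
def pvEventsOf (token : String) : List (Option String) :=
  if token = "/" then [none]
  else if !PySem.Str.isIn "/" token || PySem.Str.startswith token "/"
      || PySem.Str.startswith token "./" || PySem.Str.startswith token "../" then
    [some token]
  else
    let parts := (PySem.Str.split? token "/").getD []  -- sep "/" is non-empty: split? is always `some` here
    (PySem.List.enumerate parts).flatMap (fun ip =>
      (let p := PySem.Str.strip ip.2; if p ≠ "" then [some p] else []) ++
      (if ip.1 < (parts.length : Int) - 1 then [none] else []))

-- Phase 2: fold one event into the (groups, current) state
def pvGroupStep (st : List (List String) × List String) (ev : Option String) :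
    List (List String) × List String :=
  match ev with
  | none => if st.2 ≠ [] then (st.1 ++ [st.2], []) else st
  | some s => (st.1, st.2 ++ [s])

def split_slash_groups_py_alt (args : List String) : List (List String) :=
  let events := args.flatMap pvEventsOf
  let st := events.foldl pvGroupStep ([], [])
  if st.2 ≠ [] then st.1 ++ [st.2] else st.1

-- ===== PRECONDITION & SPEC =====
def Spec_split_slash_groups_py (args : List String) (out : List (List String)) : Prop := out = split_slash_groups_py_alt args
instance (args : List String) (out : List (List String)) : Decidable (Spec_split_slash_groups_py args out) := by unfold Spec_split_slash_groups_py; infer_instance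

-- ===== CLAIM (what is proved, stated in full; the proofs are below) =====
def Claim_equal_split_slash_groups_py : Prop := ∀ (args : List String), Dom_split_slash_groups_py args → Spec_split_slash_groups_py args (split_slash_groups_py args)

-- ===== LEMMAS AND PROOFS =====

-- fold over a concatenation of per-element chunks = fold of the chunk-folds
theorem pv_foldl_flatMap {α β γ : Type} (f : α → List β) (g : γ → β → γ)
    (l : List α) (s : γ) :
    List.foldl g s (l.flatMap f)
      = List.foldl (fun s x => List.foldl g s (f x)) s l := by
  induction l generalizing s with
  | nil => rfl
  | cons x xs ih => simp [List.flatMap_cons, List.foldl_append, ih]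

-- folding the two events of one part = A's inner loop body
theorem pv_inner_eq (parts : List String) (st : List (List String) × List String)
    (ip : Int × String) :
    List.foldl pvGroupStep st
      ((let p := PySem.Str.strip ip.2; if p ≠ "" then [some p] else []) ++
        (if ip.1 < (parts.length : Int) - 1 then [none] else []))
      = pvAInner parts st ip := by
  unfold pvAInner
  by_cases hp : PySem.Str.strip ip.2 = "" <;>
    by_cases hi : ip.1 < (parts.length : Int) - 1 <;>
      simp [hp, hi, pvGroupStep]

-- folding one token's event stream = A's outer loop body
theorem pv_token_eq (st : List (List String) × List String) (token : String) :
    List.foldl pvGroupStep st (pvEventsOf token) = pvAStep st token := by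
  unfold pvEventsOf pvAStep
  by_cases h1 : token = "/"
  · simp [h1, pvGroupStep]
  · by_cases h2 : (!PySem.Str.isIn "/" token || PySem.Str.startswith token "/"
        || PySem.Str.startswith token "./" || PySem.Str.startswith token "../") = true
    · simp only [if_neg h1, if_pos h2]
      rfl
    · simp only [if_neg h1, if_neg h2]
      rw [pv_foldl_flatMap]
      exact PySem.List.foldl_congr_mem _ _ _ _ (fun acc ip _ => pv_inner_eq _ acc ip)

-- ===== VERDICT (by name: the statement is the Claim_ definition above) =====
theorem split_slash_groups_py_spec : Claim_equal_split_slash_groups_py := by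
  intro args _
  unfold Spec_split_slash_groups_py
  have h : List.foldl pvGroupStep ([], []) (args.flatMap pvEventsOf)
      = List.foldl pvAStep ([], []) args := by
    rw [pv_foldl_flatMap]
    exact PySem.List.foldl_congr_mem _ _ _ _ (fun acc tok _ => pv_token_eq acc tok)
  simp only [split_slash_groups_py, split_slash_groups_py_alt, h]
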